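-- pv_equiv track=rewrite | github.com/JackDanger/rigz | scripts/compare_asm.py | extract_refill_pattern
-- ===== SOURCE A (Python) =====
-- from typing import List, Dict, Tuple, Set
--
-- def extract_refill_pattern(asm_lines: List[str]) -> List[str]:
--     """Extract the refill pattern from assembly"""
--     refill = []
--     in_refill = False
--
--     for line in asm_lines:
--         # Look for refill check pattern
--         if 'cmp' in line.lower() and '47' in line:  # Compare bitsleft to 47
--             in_refill = True
--
--         if in_refill:
--             refill.append(line)
--             if 'orr' in line.lower() and len(refill) > 5:
--                 in_refill = False
--                 break
--
--     return refill
-- ===== SOURCE B (Python) =====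
-- def extract_refill_pattern(asm_lines):
--     """Extract the refill pattern from assembly"""
--     # Index-arithmetic formulation: the result is a contiguous slice of the
--     # input, so compute its two boundary indices and slice — no accumulator,
--     # no state machine.
--     starts = [i for i, line in enumerate(asm_lines)
--               if 'cmp' in line.lower() and '47' in line]
--     if not starts:
--         return []
--     tail = asm_lines[starts[0]:]
--     ends = [j for j, line in enumerate(tail)
--             if j >= 5 and 'orr' in line.lower()]
--     return tail[:ends[0] + 1] if ends else tail
-- ===== Notes on version B (the rewrite author's own statement) =====
-- stated objective: alternative
-- what changed: Recasts the stateful scan as index arithmetic: the result is always a contiguous slice of the input, so B computes the two boundary indices (first 'cmp'/'47' line; first 'orr' line at offset >= 5 after it) with comprehensions and returns a slice, with no accumulator or in_refill state machine.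
import Mathlib
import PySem

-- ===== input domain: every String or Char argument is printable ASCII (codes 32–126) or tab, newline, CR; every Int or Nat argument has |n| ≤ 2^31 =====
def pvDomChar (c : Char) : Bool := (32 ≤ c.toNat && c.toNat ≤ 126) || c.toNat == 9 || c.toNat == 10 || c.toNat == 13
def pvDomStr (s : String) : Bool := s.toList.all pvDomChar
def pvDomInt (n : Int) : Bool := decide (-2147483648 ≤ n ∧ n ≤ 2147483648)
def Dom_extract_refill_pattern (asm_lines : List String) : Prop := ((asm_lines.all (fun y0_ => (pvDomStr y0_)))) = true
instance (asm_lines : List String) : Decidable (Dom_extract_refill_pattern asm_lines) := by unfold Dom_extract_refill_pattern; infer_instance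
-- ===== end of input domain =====

-- B replaces A's in_refill state machine by index arithmetic (boundary indices + slicing); same cost, no accumulator.

-- ===== PORT A =====
-- A: single scan with an in_refill boolean flag, appending to refill and breaking.
def goA (lines : List String) (refill : List String) (in_refill : Bool) : List String :=
  match lines with
  | [] => refill
  | l :: rest =>
    let in_refill := if PySem.Str.isIn "cmp" (PySem.Str.lower l) && PySem.Str.isIn "47" l then true else in_refill
    if in_refill then
      let refill := refill ++ [l]
      if PySem.Str.isIn "orr" (PySem.Str.lower l) && decide (refill.length > 5) then refill
      else goA rest refill in_refill
    else goA rest refill in_refill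

def extract_refill_pattern (asm_lines : List String) : List String :=
  goA asm_lines [] false

-- ===== PORT B =====
-- B: comprehensions over enumerate yield the two boundary indices; the result is a slice.
def triggerB (l : String) : Bool := PySem.Str.isIn "cmp" (PySem.Str.lower l) && PySem.Str.isIn "47" l

def orrB (l : String) : Bool := PySem.Str.isIn "orr" (PySem.Str.lower l)

def extract_refill_pattern_alt (asm_lines : List String) : List String :=
  match ((PySem.List.enumerate asm_lines).filter (fun p => triggerB p.2)).map (fun p => p.1) with
  | [] => []
  | start :: _ =>
    match ((PySem.List.enumerate (PySem.List.slice asm_lines (some start) none)).filter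
        (fun p => decide (5 ≤ p.1) && orrB p.2)).map (fun p => p.1) with
    | [] => PySem.List.slice asm_lines (some start) none
    | e :: _ => PySem.List.slice (PySem.List.slice asm_lines (some start) none) none (some (e + 1))

-- ===== PRECONDITION & SPEC =====
def Spec_extract_refill_pattern (asm_lines : List String) (out : List String) : Prop := out = extract_refill_pattern_alt asm_lines
instance (asm_lines : List String) (out : List String) : Decidable (Spec_extract_refill_pattern asm_lines out) := by unfold Spec_extract_refill_pattern; infer_instance

-- ===== CLAIM (what is proved, stated in full; the proofs are below) =====
def Claim_equal_extract_refill_pattern : Prop := ∀ (asm_lines : List String), Dom_extract_refill_pattern asm_lines → Spec_extract_refill_pattern asm_lines (extract_refill_pattern asm_lines)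

-- ===== LEMMAS AND PROOFS =====
-- Proof-side reformulation of A's tail phase (once in_refill is set it never resets):
-- collect with an accumulator, then as a take-prefix governed by frEnd.
def collectP (lines : List String) (refill : List String) : List String :=
  match lines with
  | [] => refill
  | l :: rest =>
    let refill := refill ++ [l]
    if orrB l && decide (refill.length > 5) then refill
    else collectP rest refill

def ctake (lines : List String) (k : Nat) : List String :=
  match lines with
  | [] => []
  | l :: rest =>
    l :: (if orrB l && decide (k + 1 > 5) then [] else ctake rest (k + 1))

def frEnd (lines : List String) (k : Nat) : Option Nat :=
  match lines with
  | [] => none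
  | l :: rest => if decide (5 ≤ k) && orrB l then some k else frEnd rest (k + 1)

theorem goA_true_eq_collectP (lines refill) : goA lines refill true = collectP lines refill := by
  induction lines generalizing refill with
  | nil => rfl
  | cons l rest ih =>
    simp only [goA, collectP, orrB, ite_self, if_true]
    split
    · rfl
    · exact ih _

theorem goA_false_eq (lines) :
    goA lines [] false =
      (match lines.findIdx? triggerB with
       | none => []
       | some s => collectP (lines.drop s) []) := by
  induction lines with
  | nil => rfl
  | cons l rest ih =>
    by_cases h : triggerB l = true
    · have h' : (PySem.Str.isIn "cmp" (PySem.Str.lower l) && PySem.Str.isIn "47" l) = true := h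
      simp only [goA, h', if_true, List.findIdx?_cons, h, List.drop_zero, collectP, orrB,
        List.nil_append]
      split
      · rfl
      · exact goA_true_eq_collectP rest [l]
    · have h' : triggerB l = false := by simpa using h
      have h'' : (PySem.Str.isIn "cmp" (PySem.Str.lower l) && PySem.Str.isIn "47" l) = false := by
        simpa [triggerB] using h'
      simp only [goA, h'', Bool.false_eq_true, if_false]
      rw [ih]
      simp only [List.findIdx?_cons, h', Bool.false_eq_true, if_false]
      cases hrest : rest.findIdx? triggerB with
      | none => rfl
      | some i => simp [List.drop_succ_cons]

theorem frEnd_ge (lines) (k j : Nat) (h : frEnd lines k = some j) : k ≤ j := by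
  induction lines generalizing k with
  | nil => simp [frEnd] at h
  | cons l rest ih =>
    simp only [frEnd] at h
    split at h
    · simp only [Option.some_inj] at h; omega
    · exact Nat.le_of_succ_le (ih (k + 1) h)

theorem ctake_eq_frEnd (lines) (k : Nat) :
    ctake lines k =
      (match frEnd lines k with
       | none => lines
       | some j => lines.take (j - k + 1)) := by
  induction lines generalizing k with
  | nil => rfl
  | cons l rest ih =>
    have hcond : (orrB l && decide (k + 1 > 5)) = (decide (5 ≤ k) && orrB l) := by
      cases horr : orrB l
      · simp
      · simp only [Bool.true_and, Bool.and_true]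
        exact decide_eq_decide.mpr (by omega)
    simp only [ctake, frEnd, hcond]
    by_cases hc : (decide (5 ≤ k) && orrB l) = true
    · simp [hc]
    · have hc' : (decide (5 ≤ k) && orrB l) = false := by simpa using hc
      simp only [hc', Bool.false_eq_true, if_false]
      rw [ih (k + 1)]
      cases hf : frEnd rest (k + 1) with
      | none => rfl
      | some j =>
        have hj := frEnd_ge rest (k + 1) j hf
        have hsub : j - k + 1 = (j - (k + 1) + 1) + 1 := by omega
        simp [hsub, List.take_succ_cons]

theorem collectP_eq_ctake (lines) (acc : List String) :
    collectP lines acc = acc ++ ctake lines acc.length := by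
  induction lines generalizing acc with
  | nil => simp [collectP, ctake]
  | cons l rest ih =>
    simp only [collectP, ctake, List.length_append, List.length_singleton]
    cases hc : (orrB l && decide (acc.length + 1 > 5))
    · simp only [Bool.false_eq_true, if_false]
      rw [ih (acc ++ [l])]
      simp
    · simp

-- heads of the two comprehensions
theorem starts_head (lines : List String) (k : Nat) :
    ((((PySem.List.enumerate lines (k : Int)).filter (fun p => triggerB p.2)).map (fun p => p.1)).head?) =
      Option.map (fun n : Nat => ((k + n : Nat) : Int)) (lines.findIdx? triggerB) := by
  induction lines generalizing k with
  | nil => rfl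
  | cons l rest ih =>
    rw [PySem.List.enumerate_cons]
    by_cases h : triggerB l = true
    · simp [h, List.findIdx?_cons]
    · have h' : triggerB l = false := by simpa using h
      simp only [List.filter_cons, h', Bool.false_eq_true, if_false, List.findIdx?_cons]
      have : ((k : Int) + 1) = ((k + 1 : Nat) : Int) := by push_cast; ring
      rw [this, ih (k + 1)]
      cases rest.findIdx? triggerB with
      | none => rfl
      | some n =>
        simp only [Option.map_some]
        congr 1
        push_cast; ring

theorem ends_head (lines : List String) (k : Nat) :
    ((((PySem.List.enumerate lines (k : Int)).filter (fun p => decide (5 ≤ p.1) && orrB p.2)).map (fun p => p.1)).head?) =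
      Option.map (fun n : Nat => (n : Int)) (frEnd lines k) := by
  induction lines generalizing k with
  | nil => rfl
  | cons l rest ih =>
    rw [PySem.List.enumerate_cons]
    have hdec : decide (5 ≤ (k : Int)) = decide (5 ≤ k) := by
      exact decide_eq_decide.mpr (by omega)
    by_cases h : (decide (5 ≤ k) && orrB l) = true
    · simp [frEnd, h]
    · have h' : (decide (5 ≤ k) && orrB l) = false := by simpa using h
      simp only [List.filter_cons, hdec, h', Bool.false_eq_true, if_false, frEnd]
      have : ((k : Int) + 1) = ((k + 1 : Nat) : Int) := by push_cast; ring
      rw [this, ih (k + 1)]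

-- ===== VERDICT (by name: the statement is the Claim_ definition above) =====
theorem extract_refill_pattern_spec : Claim_equal_extract_refill_pattern := by
  intro lines _
  unfold Spec_extract_refill_pattern extract_refill_pattern extract_refill_pattern_alt
  rw [goA_false_eq]
  have hs := starts_head lines 0
  rw [Nat.cast_zero] at hs
  cases hfi : lines.findIdx? triggerB with
  | none =>
    rw [hfi, Option.map_none, List.head?_eq_none_iff] at hs
    simp only [hs]
  | some s =>
    rw [hfi, Option.map_some] at hs
    cases hl : ((PySem.List.enumerate lines).filter (fun p => triggerB p.2)).map (fun p => p.1) with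
    | nil => rw [hl] at hs; simp at hs
    | cons st srest =>
      rw [hl, List.head?_cons] at hs
      have hst : st = ((0 + s : Nat) : Int) := Option.some.inj hs
      simp only [hst, PySem.List.slice_from_natCast, Nat.zero_add]
      -- tail phase
      rw [collectP_eq_ctake, ctake_eq_frEnd]
      have he := ends_head (lines.drop s) 0
      rw [Nat.cast_zero] at he
      cases hfe : frEnd (lines.drop s) 0 with
      | none =>
        rw [hfe, Option.map_none, List.head?_eq_none_iff] at he
        simp only [he, List.nil_append, List.length_nil, hfe]
      | some j =>
        rw [hfe, Option.map_some] at he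
        cases hl2 : ((PySem.List.enumerate (lines.drop s)).filter (fun p => decide (5 ≤ p.1) && orrB p.2)).map (fun p => p.1) with
        | nil => rw [hl2] at he; simp at he
        | cons e erest =>
          rw [hl2, List.head?_cons] at he
          have hej : e = ((j : Nat) : Int) := Option.some.inj he
          have hee : e + 1 = ((j + 1 : Nat) : Int) := by rw [hej]; push_cast; ring
          simp only [hee, PySem.List.slice_to_natCast, List.nil_append, List.length_nil, hfe, Nat.sub_zero]
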